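-- pv_equiv track=rewrite | github.com/animeshokhade/dsa | scaler/Elements Removal.py | solve
-- ===== SOURCE A (Python) =====
-- def solve(A):
--     A = sorted(A)
--     B = A[::-1]
--     summ = sum(B)
--     cost = summ
--     for i in range(len(B)):
--         if i != 0:
--             cost += summ
--         summ -= B[0]
--         B = B[1:]
--     return cost
-- ===== SOURCE B (Python) =====
-- def solve(A):
--     # sort once, then a single pass: the k-th largest element is paid k+1 times
--     return sum((i + 1) * v for i, v in enumerate(sorted(A)[::-1]))
-- ===== Notes on version B (the rewrite author's own statement) =====
-- stated objective: faster
-- what changed: Replaced the quadratic loop that repeatedly re-slices the list and re-accumulates running sums with a closed-form single pass: sort, reverse, and sum (i+1)*v over the enumerated list.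
import Mathlib
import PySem

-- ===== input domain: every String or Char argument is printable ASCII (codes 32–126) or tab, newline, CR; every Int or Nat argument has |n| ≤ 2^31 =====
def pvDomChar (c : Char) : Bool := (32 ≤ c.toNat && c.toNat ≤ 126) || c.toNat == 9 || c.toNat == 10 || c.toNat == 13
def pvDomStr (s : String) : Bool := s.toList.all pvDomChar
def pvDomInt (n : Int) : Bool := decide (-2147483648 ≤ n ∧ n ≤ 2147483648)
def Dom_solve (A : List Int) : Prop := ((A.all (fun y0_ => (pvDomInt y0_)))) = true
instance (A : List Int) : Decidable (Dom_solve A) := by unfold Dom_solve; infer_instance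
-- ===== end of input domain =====

-- B replaces A's quadratic re-slicing loop with one pass summing (i+1)*v over the
-- reversed sorted list (same return value; objective: faster, asymptotically).

-- ===== PORT A =====
-- loop body of A's for-loop; B[0] is always in range (B has length n-i), default 0 never used
def solveStep (st : Int × Int × List Int) (i : Int) : Int × Int × List Int :=
  match st with
  | (cost, summ, B) =>
    let cost := if i ≠ 0 then cost + summ else cost
    let summ := summ - PySem.List.pyGetD B 0 0
    (cost, summ, PySem.List.slice B (some 1) none)

def solve (A : List Int) : Int :=
  let As := PySem.List.sorted A (fun x => x) false
  let B := (PySem.List.slice? As none none (-1)).getD []   -- A[::-1]; step ≠ 0, always some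
  let summ := B.sum
  let cost := summ
  ((PySem.List.pyRange 0 (PySem.List.len B) 1).foldl solveStep (cost, summ, B)).1

-- ===== PORT B =====
def solve_alt (A : List Int) : Int :=
  let B := (PySem.List.slice? (PySem.List.sorted A (fun x => x) false) none none (-1)).getD []
  (PySem.List.enumerate B 0).foldl (fun acc p => acc + (p.1 + 1) * p.2) 0

-- ===== PRECONDITION & SPEC =====
def Spec_solve (A : List Int) (out : Int) : Prop := out = solve_alt A
instance (A : List Int) (out : Int) : Decidable (Spec_solve A out) := by unfold Spec_solve; infer_instance

-- ===== CLAIM (what is proved, stated in full; the proofs are below) =====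
def Claim_equal_solve : Prop := ∀ (A : List Int), Dom_solve A → Spec_solve A (solve A)

-- ===== LEMMAS AND PROOFS =====

-- cost added by A's loop from state (summ = s, list B), when every index is nonzero
def fA : List Int → Int → Int
  | [], _ => 0
  | x :: r, s => s + fA r (s - x)

-- weighted sum Σ (a+1+k)*B[k], the value of B's fold
def wB : List Int → Int → Int
  | [], _ => 0
  | x :: r, a => (a + 1) * x + wB r (a + 1)

lemma loopA (B : List Int) (a c s : Int) (ha : 1 ≤ a) :
    ((PySem.List.pyRange a (a + (B.length : Int)) 1).foldl solveStep (c, s, B)).1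
      = c + fA B s := by
  induction B generalizing a c s with
  | nil => simp [PySem.List.pyRange_one_eq_nil, fA]
  | cons x r ih =>
      rw [PySem.List.pyRange_one_cons
        (by simp only [List.length_cons]; push_cast; omega)]
      simp only [List.foldl_cons]
      have hane : a ≠ 0 := by omega
      have hstep : solveStep (c, s, x :: r) a = (c + s, s - x, r) := by
        simp [solveStep, hane, PySem.List.pyGetD_zero_cons, PySem.List.slice_from_one]
      rw [hstep]
      have hlen : a + ((x :: r).length : Int) = (a + 1) + (r.length : Int) := by
        simp only [List.length_cons]; push_cast; omega
      rw [hlen, ih (a + 1) (c + s) (s - x) (by omega)]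
      simp only [fA]
      ring

lemma enumB (B : List Int) (a : Int) (acc : Int) :
    (PySem.List.enumerate B a).foldl (fun acc p => acc + (p.1 + 1) * p.2) acc = acc + wB B a := by
  induction B generalizing a acc with
  | nil => simp [PySem.List.enumerate_nil, wB]
  | cons x r ih =>
      simp only [PySem.List.enumerate_cons, List.foldl_cons, wB, ih]
      ring

lemma wB_shift (B : List Int) (a : Int) : wB B (a + 1) = wB B a + B.sum := by
  induction B generalizing a with
  | nil => simp [wB]
  | cons x r ih => simp only [wB, List.sum_cons, ih]; ring

lemma fA_sum_eq_wB (B : List Int) : fA B B.sum = wB B 0 := by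
  induction B with
  | nil => rfl
  | cons x r ih =>
      simp only [fA, List.sum_cons, wB]
      have hx : x + r.sum - x = r.sum := by ring
      rw [hx, ih, wB_shift r 0]
      ring

-- the two folds agree for ANY list B (in use: B = reversed sorted A)
lemma mainEq (B : List Int) :
    ((PySem.List.pyRange 0 (PySem.List.len B) 1).foldl solveStep (B.sum, B.sum, B)).1
      = (PySem.List.enumerate B 0).foldl (fun acc p => acc + (p.1 + 1) * p.2) 0 := by
  rw [enumB, PySem.List.len_eq]
  cases B with
  | nil => simp [PySem.List.pyRange_one_eq_nil, wB]
  | cons x r =>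
      rw [PySem.List.pyRange_one_cons
        (by simp only [List.length_cons]; push_cast; omega)]
      simp only [List.foldl_cons]
      have hstep : solveStep ((x :: r).sum, (x :: r).sum, x :: r) 0
          = ((x :: r).sum, (x :: r).sum - x, r) := by
        simp [solveStep, PySem.List.pyGetD_zero_cons, PySem.List.slice_from_one]
      rw [hstep]
      have hlen : (((x :: r).length : Int)) = (0 + 1) + (r.length : Int) := by
        simp only [List.length_cons]; push_cast; omega
      rw [hlen, loopA r (0 + 1) ((x :: r).sum) ((x :: r).sum - x) (by omega)]
      have hs : (x :: r).sum - x = r.sum := by simp [List.sum_cons]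
      rw [hs, fA_sum_eq_wB r]
      simp only [wB, List.sum_cons, wB_shift r 0]
      ring

-- ===== VERDICT (by name: the statement is the Claim_ definition above) =====
theorem solve_spec : Claim_equal_solve := by
  intro A _
  unfold Spec_solve
  simp only [solve, solve_alt, PySem.List.slice?_none_none_neg_one, Option.getD_some]
  exact mainEq _
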